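-- pv_equiv track=rewrite | github.com/naeem91/dsand | P2/rearrange_array_elements.py | rearrange_array_elements
-- ===== SOURCE A (Python) =====
-- def _heapify(arr, n, i):
--     largest_index = i
--     left_node = 2 * i + 1
--     right_node = 2 * i + 2
--
--     # compare with left child
--     if left_node < n and arr[i] < arr[left_node]:
--         largest_index = left_node
--
--     # compare with right child
--     if right_node < n and arr[largest_index] < arr[right_node]:
--         largest_index = right_node
--
--     # if either of left / right child is the largest node
--     if largest_index != i:
--         arr[i], arr[largest_index] = arr[largest_index], arr[i]
--
--         _heapify(arr, n, largest_index)
--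
-- def _convert_items_to_decimal(arr):
--     """
--     e.g; [9, 6, 4] -> 964
--     """
--     decimal = 0
--
--     power_of_10 = 0
--     for i in range(len(arr) - 1, -1, -1):
--         decimal += pow(10, power_of_10) * arr[i]
--         power_of_10 += 1
--
--     return decimal
--
-- def rearrange_array_elements(arr):
--     if type(arr) != list or len(arr) == 0:
--         raise ValueError('Provide a non-empty list')
--
--     n = len(arr)
--
--     # Build a maxheap.
--     for i in range(n, -1, -1):
--         _heapify(arr, n, i)
--
--     # extract max elements and place in two arrays alternatively
--     num1 = []
--     num2 = []
--
--     num1.append(arr[0])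
--     place = 2
--
--     for i in range(n-1, 0, -1):
--         arr[i], arr[0] = arr[0], arr[i]
--         _heapify(arr, i, 0)
--
--         if place == 1:
--             num1.append(arr[0])
--             place = 2
--         else:
--             num2.append(arr[0])
--             place = 1
--
--     # convert list of ints to a single decimal
--     return [_convert_items_to_decimal(num1), _convert_items_to_decimal(num2)]
-- ===== SOURCE B (Python) =====
-- def _value(digits):
--     acc = 0
--     for d in digits:
--         acc = acc * 10 + d
--     return acc
--
--
-- def rearrange_array_elements(arr):
--     if type(arr) != list or len(arr) == 0:
--         raise ValueError('Provide a non-empty list')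
--
--     # same observable in-place mutation as A's heapsort: arr ends up ascending
--     arr.sort()
--     desc = arr[::-1]
--     return [_value(desc[0::2]), _value(desc[1::2])]
-- ===== Notes on version B (the rewrite author's own statement) =====
-- stated objective: simpler
-- what changed: Replaces the hand-written max-heapify/heapsort extraction that interleaves root pops into two lists with a single library sort, a reversed view split by step-2 slices, and a multiply-accumulate fold instead of the pow(10,k) digit loop; the C-implemented list.sort also makes B measurably faster than A's Python-level recursive heapify.
import Mathlib
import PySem

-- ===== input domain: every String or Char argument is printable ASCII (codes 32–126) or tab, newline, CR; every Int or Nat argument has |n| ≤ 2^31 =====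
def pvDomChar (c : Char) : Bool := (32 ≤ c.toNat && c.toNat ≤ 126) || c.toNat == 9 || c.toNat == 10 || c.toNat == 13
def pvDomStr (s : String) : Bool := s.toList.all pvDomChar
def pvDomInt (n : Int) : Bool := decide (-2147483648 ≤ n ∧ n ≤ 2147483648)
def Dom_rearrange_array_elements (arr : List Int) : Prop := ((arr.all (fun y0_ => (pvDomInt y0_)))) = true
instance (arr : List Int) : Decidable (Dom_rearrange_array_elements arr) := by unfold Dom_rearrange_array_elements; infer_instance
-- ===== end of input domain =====

-- B replaces A's hand-written heapify/heapsort extraction by a library sort, a reversed view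
-- split with step-2 slices, and a fold-based digit accumulator (objective: simpler).
-- Both A and B sort the caller's list in place (ascending); the theorems below are about the
-- return value only (the in-place effect happens to coincide as well, but is not modelled).

-- ===== PORT A =====
-- arr[i] for a Nat index that the algorithm keeps in range: getD is exact there
def pvGetI (l : List Int) (k : Nat) : Int := l.getD k 0

-- arr[i], arr[j] = arr[j], arr[i]
def pvSwap (l : List Int) (i j : Nat) : List Int :=
  (l.set i (pvGetI l j)).set j (pvGetI l i)

-- the largest_index computed by the two 'if' comparisons of _heapify
def pvLargest (l : List Int) (n i : Nat) : Nat :=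
  let li := if 2*i+1 < n ∧ pvGetI l i < pvGetI l (2*i+1) then 2*i+1 else i
  if 2*i+2 < n ∧ pvGetI l li < pvGetI l (2*i+2) then 2*i+2 else li

-- needed by pvHeapify's termination argument
theorem pvLargest_ne {l : List Int} {n i : Nat} (h : pvLargest l n i ≠ i) :
    i < pvLargest l n i ∧ pvLargest l n i < n := by
  simp only [pvLargest] at h ⊢
  split_ifs at h ⊢ <;> omega

-- _heapify(arr, n, i)
def pvHeapify (l : List Int) (n i : Nat) : List Int :=
  if _h : pvLargest l n i ≠ i then
    pvHeapify (pvSwap l i (pvLargest l n i)) n (pvLargest l n i)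
  else l
termination_by n - i
decreasing_by
  have := pvLargest_ne _h; omega

-- for i in range(n, -1, -1): _heapify(arr, n, i)
def pvBuild (l : List Int) (n : Nat) : Nat → List Int
  | 0 => pvHeapify l n 0
  | i+1 => pvBuild (pvHeapify l n (i+1)) n i

-- for i in range(n-1, 0, -1): swap, _heapify(arr, i, 0), append arr[0] alternately
def pvExtract : List Int → List Int → List Int → Nat → Nat → List Int × List Int
  | _, n1, n2, _, 0 => (n1, n2)
  | l, n1, n2, place, i+1 =>
    let l' := pvHeapify (pvSwap l (i+1) 0) (i+1) 0
    if place = 1 then pvExtract l' (n1 ++ [pvGetI l' 0]) n2 2 i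
    else pvExtract l' n1 (n2 ++ [pvGetI l' 0]) 1 i

-- for i in range(len(arr)-1, -1, -1): decimal += pow(10, power_of_10) * arr[i]
def pvConvertLoop (arr : List Int) : Nat → Int → Nat → Int
  | _, acc, 0 => acc
  | p, acc, i+1 => pvConvertLoop arr (p+1) (acc + 10 ^ p * pvGetI arr i) i

def pvConvert (arr : List Int) : Int := pvConvertLoop arr 0 0 arr.length

def rearrange_array_elements (arr : List Int) : List Int :=
  let n := arr.length
  let l := pvBuild arr n n
  let r := pvExtract l [pvGetI l 0] [] 2 (n - 1)
  [pvConvert r.1, pvConvert r.2]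

-- ===== PORT B =====
-- acc = acc * 10 + d over the digit list
def pvValue (digits : List Int) : Int := digits.foldl (fun a d => a * 10 + d) 0

-- extended slice xs[0::2], ported by hand (exact: every second element)
def pvStepTwo : List Int → List Int
  | [] => []
  | [x] => [x]
  | x :: _ :: rest => x :: pvStepTwo rest

def rearrange_array_elements_alt (arr : List Int) : List Int :=
  let s := PySem.List.sorted arr (fun x => x) false  -- arr.sort()
  let desc := s.reverse                              -- arr[::-1] (PySem.List.slice?_none_none_neg_one)
  [pvValue (pvStepTwo desc), pvValue (pvStepTwo (desc.drop 1))]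

-- ===== PRECONDITION & SPEC =====
-- Pre_ excludes only the empty list, on which the Python A raises ValueError.
def Pre_rearrange_array_elements (arr : List Int) : Prop := arr ≠ []
instance (arr : List Int) : Decidable (Pre_rearrange_array_elements arr) := by
  unfold Pre_rearrange_array_elements; infer_instance
def pvWitness_rearrange_array_elements : List Int := [4, 6, 2, 5, 9, 8]

def Spec_rearrange_array_elements (arr : List Int) (out : List Int) : Prop :=
  out = rearrange_array_elements_alt arr
instance (arr : List Int) (out : List Int) : Decidable (Spec_rearrange_array_elements arr out) := by
  unfold Spec_rearrange_array_elements; infer_instance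

-- ===== CLAIM (what is proved, stated in full; the proofs are below) =====
def Claim_equal_rearrange_array_elements : Prop := ∀ (arr : List Int),
  Dom_rearrange_array_elements arr → Pre_rearrange_array_elements arr →
  Spec_rearrange_array_elements arr (rearrange_array_elements arr)

-- ===== LEMMAS AND PROOFS =====

-- index arithmetic of the implicit binary heap
def pvParent (k : Nat) : Nat := (k - 1) / 2
def pvDesc (i j : Nat) : Prop := ∃ t, pvParent^[t] j = i

-- the heap property at node j for heap size n
def pvHeapOK (l : List Int) (n j : Nat) : Prop :=
  (2*j+1 < n → pvGetI l (2*j+1) ≤ pvGetI l j) ∧ (2*j+2 < n → pvGetI l (2*j+2) ≤ pvGetI l j)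

-- the sequence of roots emitted by A's extraction loop
def pvEmit : List Int → Nat → List Int
  | _, 0 => []
  | l, f+1 =>
    let l' := pvHeapify (pvSwap l (f+1) 0) (f+1) 0
    pvGetI l' 0 :: pvEmit l' f

theorem pvGetI_set_self {l : List Int} {i : Nat} (v : Int) (h : i < l.length) :
    pvGetI (l.set i v) i = v := by
  simp [pvGetI, List.getD_eq_getElem?_getD, h]

theorem pvGetI_set_ne {l : List Int} {i k : Nat} (v : Int) (h : k ≠ i) :
    pvGetI (l.set i v) k = pvGetI l k := by
  simp [pvGetI, List.getD_eq_getElem?_getD, Ne.symm h]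

theorem pvSwap_length (l : List Int) (i j : Nat) : (pvSwap l i j).length = l.length := by
  simp [pvSwap]

theorem pvGetI_swap_j {l : List Int} {i j : Nat} (hj : j < l.length) :
    pvGetI (pvSwap l i j) j = pvGetI l i := by
  unfold pvSwap
  exact pvGetI_set_self _ (by simpa using hj)

theorem pvGetI_swap_i {l : List Int} {i j : Nat} (hi : i < l.length) (hne : i ≠ j) :
    pvGetI (pvSwap l i j) i = pvGetI l j := by
  unfold pvSwap
  rw [pvGetI_set_ne _ hne, pvGetI_set_self _ hi]

theorem pvGetI_swap_other {l : List Int} {i j k : Nat} (h1 : k ≠ i) (h2 : k ≠ j) :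
    pvGetI (pvSwap l i j) k = pvGetI l k := by
  unfold pvSwap
  rw [pvGetI_set_ne _ h2, pvGetI_set_ne _ h1]

theorem pv_cons_set_perm (t : List Int) (m : Nat) (hm : m < t.length) (a : Int) :
    (t.getD m 0 :: t.set m a).Perm (a :: t) := by
  induction t generalizing m with
  | nil => simp at hm
  | cons b t ih =>
    cases m with
    | zero => simpa using List.Perm.swap a b t
    | succ m =>
      have h1 := ih m (by simpa using hm)
      have h2 : ((b :: t).getD (m+1) 0 :: (b :: t).set (m+1) a) = t.getD m 0 :: b :: t.set m a := by
        simp [List.getD]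
      rw [h2]
      exact (List.Perm.swap b (t.getD m 0) (t.set m a)).trans ((h1.cons b).trans (List.Perm.swap a b t))

theorem pvSwap_perm (l : List Int) (i j : Nat) (hi : i < l.length) (hj : j < l.length) :
    (pvSwap l i j).Perm l := by
  induction l generalizing i j with
  | nil => simp at hi
  | cons x t ih =>
    cases i with
    | zero =>
      cases j with
      | zero => simp [pvSwap, pvGetI]
      | succ m =>
        have hm : m < t.length := by simpa using hj
        have he : pvSwap (x :: t) 0 (m+1) = t.getD m 0 :: t.set m x := by
          simp [pvSwap, pvGetI, List.getD]
        rw [he]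
        exact pv_cons_set_perm t m hm x
    | succ k =>
      cases j with
      | zero =>
        have hk : k < t.length := by simpa using hi
        have he : pvSwap (x :: t) (k+1) 0 = t.getD k 0 :: t.set k x := by
          simp [pvSwap, pvGetI, List.getD]
        rw [he]
        exact pv_cons_set_perm t k hk x
      | succ m =>
        have he : pvSwap (x :: t) (k+1) (m+1) = x :: pvSwap t k m := by
          simp [pvSwap, pvGetI, List.getD]
        rw [he]
        exact (ih k m (by simpa using hi) (by simpa using hj)).cons x

theorem pvParent_left (i : Nat) : pvParent (2*i+1) = i := by unfold pvParent; omega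
theorem pvParent_right (i : Nat) : pvParent (2*i+2) = i := by unfold pvParent; omega

theorem pvDesc_refl (i : Nat) : pvDesc i i := ⟨0, rfl⟩

theorem pvDesc_child_left {i j : Nat} (h : pvDesc i j) : pvDesc i (2*j+1) := by
  obtain ⟨t, ht⟩ := h
  exact ⟨t+1, by rw [Function.iterate_succ_apply, pvParent_left]; exact ht⟩

theorem pvDesc_child_right {i j : Nat} (h : pvDesc i j) : pvDesc i (2*j+2) := by
  obtain ⟨t, ht⟩ := h
  exact ⟨t+1, by rw [Function.iterate_succ_apply, pvParent_right]; exact ht⟩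

theorem pvParent_iter_le : ∀ (t j : Nat), pvParent^[t] j ≤ j := by
  intro t
  induction t with
  | zero => simp
  | succ t ih =>
    intro j
    rw [Function.iterate_succ_apply]
    exact (ih (pvParent j)).trans (by unfold pvParent; omega)

theorem pvDesc_le {i j : Nat} (h : pvDesc i j) : i ≤ j := by
  obtain ⟨t, ht⟩ := h
  subst ht
  exact pvParent_iter_le t j

theorem pvDesc_trans {i j k : Nat} (h1 : pvDesc i j) (h2 : pvDesc j k) : pvDesc i k := by
  obtain ⟨s, hs⟩ := h1; obtain ⟨t, ht⟩ := h2
  exact ⟨s + t, by rw [Function.iterate_add_apply, ht, hs]⟩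

theorem pvDesc_parent {i j : Nat} (h : pvDesc i j) (hne : j ≠ i) : pvDesc i (pvParent j) := by
  obtain ⟨t, ht⟩ := h
  cases t with
  | zero => exact absurd ht hne
  | succ t => exact ⟨t, by rw [Function.iterate_succ_apply] at ht; exact ht⟩

theorem pvChild_of_parent {k : Nat} (h : k ≠ 0) : k = 2 * pvParent k + 1 ∨ k = 2 * pvParent k + 2 := by
  unfold pvParent; omega

theorem pvDesc_zero (j : Nat) : pvDesc 0 j := by
  induction j using Nat.strong_induction_on with
  | _ j ih =>
    rcases Nat.eq_zero_or_pos j with h | h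
    · subst h; exact pvDesc_refl 0
    · have hp : pvDesc 0 (pvParent j) := ih (pvParent j) (by unfold pvParent; omega)
      rcases pvChild_of_parent (by omega : j ≠ 0) with h2 | h2
      · rw [h2]; exact pvDesc_child_left hp
      · rw [h2]; exact pvDesc_child_right hp

theorem pvLargest_spec (l : List Int) (n i : Nat) :
    (pvLargest l n i = i ∨ ((pvLargest l n i = 2*i+1 ∨ pvLargest l n i = 2*i+2) ∧ pvLargest l n i < n)) ∧
    pvGetI l i ≤ pvGetI l (pvLargest l n i) ∧
    (2*i+1 < n → pvGetI l (2*i+1) ≤ pvGetI l (pvLargest l n i)) ∧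
    (2*i+2 < n → pvGetI l (2*i+2) ≤ pvGetI l (pvLargest l n i)) := by
  simp only [pvLargest]
  split_ifs <;> refine ⟨by omega, by omega, fun h => by omega, fun h => by omega⟩

theorem pvRootDom {l : List Int} {n c : Nat}
    (h : ∀ j, pvDesc c j → j < n → pvHeapOK l n j) :
    ∀ k, pvDesc c k → k < n → pvGetI l k ≤ pvGetI l c := by
  intro k
  induction k using Nat.strong_induction_on with
  | _ k ih =>
    intro hk hkn
    by_cases hkc : k = c
    · subst hkc; exact le_refl _
    · have hcle : c ≤ k := pvDesc_le hk
      have hk0 : k ≠ 0 := by omega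
      have hp := pvDesc_parent hk hkc
      have hplt : pvParent k < k := by unfold pvParent; omega
      have hpn : pvParent k < n := lt_trans hplt hkn
      have hOK := h (pvParent k) hp hpn
      have hrest := ih (pvParent k) hplt hp hpn
      have hkle : pvGetI l k ≤ pvGetI l (pvParent k) := by
        rcases pvChild_of_parent hk0 with hc1 | hc1
        · have h9 := hOK.1 (by omega); rw [← hc1] at h9; exact h9
        · have h9 := hOK.2 (by omega); rw [← hc1] at h9; exact h9
      exact le_trans hkle hrest

theorem pvLargest_of_ge {l : List Int} {n i : Nat} (h : n ≤ i) : pvLargest l n i = i := by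
  simp only [pvLargest]
  split_ifs <;> omega

theorem pvHeapify_spec_base {n i : Nat} {l : List Int} (hlg : pvLargest l n i = i)
    (hpre : ∀ j, pvDesc i j → j ≠ i → j < n → pvHeapOK l n j) :
    ((pvHeapify l n i).length = l.length ∧
     (pvHeapify l n i).Perm l ∧
     (∀ k, ¬ pvDesc i k → pvGetI (pvHeapify l n i) k = pvGetI l k) ∧
     (∀ k, n ≤ k → pvGetI (pvHeapify l n i) k = pvGetI l k) ∧
     (∀ k, pvDesc i k → k < n → ∃ k', pvDesc i k' ∧ k' < n ∧ pvGetI (pvHeapify l n i) k = pvGetI l k') ∧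
     (∀ j, pvDesc i j → j < n → pvHeapOK (pvHeapify l n i) n j)) := by
  have hr : pvHeapify l n i = l := by
    rw [pvHeapify, dif_neg (by simpa using hlg)]
  rw [hr]
  refine ⟨rfl, List.Perm.refl l, fun k _ => rfl, fun k _ => rfl,
    fun k hk hkn => ⟨k, hk, hkn, rfl⟩, ?_⟩
  intro j hj hjn
  by_cases hji : j = i
  · subst hji
    have hsp := pvLargest_spec l n j
    rw [hlg] at hsp
    exact ⟨fun h => hsp.2.2.1 h, fun h => hsp.2.2.2 h⟩
  · exact hpre j hj hji hjn

theorem pvHeapify_spec_aux (n : Nat) : ∀ (fuel i : Nat) (l : List Int), n - i ≤ fuel →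
    n ≤ l.length →
    (∀ j, pvDesc i j → j ≠ i → j < n → pvHeapOK l n j) →
    ((pvHeapify l n i).length = l.length ∧
     (pvHeapify l n i).Perm l ∧
     (∀ k, ¬ pvDesc i k → pvGetI (pvHeapify l n i) k = pvGetI l k) ∧
     (∀ k, n ≤ k → pvGetI (pvHeapify l n i) k = pvGetI l k) ∧
     (∀ k, pvDesc i k → k < n → ∃ k', pvDesc i k' ∧ k' < n ∧ pvGetI (pvHeapify l n i) k = pvGetI l k') ∧
     (∀ j, pvDesc i j → j < n → pvHeapOK (pvHeapify l n i) n j)) := by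
  intro fuel
  induction fuel with
  | zero =>
    intro i l hfuel hlen hpre
    exact pvHeapify_spec_base (pvLargest_of_ge (by omega)) hpre
  | succ fuel ih =>
    intro i l hfuel hlen hpre
    by_cases hlg : pvLargest l n i = i
    · exact pvHeapify_spec_base hlg hpre
    · obtain ⟨hilt, hltn⟩ := pvLargest_ne hlg
      set lg := pvLargest l n i with hdef
      have hsp := pvLargest_spec l n i
      rw [← hdef] at hsp
      have hchild : lg = 2*i+1 ∨ lg = 2*i+2 := by
        rcases hsp.1 with h | h
        · exact absurd h hlg
        · exact h.1
      have hil : i < l.length := by omega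
      have hlgl : lg < l.length := by omega
      have hdilg : pvDesc i lg := by
        rcases hchild with h | h
        · rw [h]; exact pvDesc_child_left (pvDesc_refl i)
        · rw [h]; exact pvDesc_child_right (pvDesc_refl i)
      have hplg : pvParent lg = i := by
        rcases hchild with h | h
        · rw [h, pvParent_left]
        · rw [h, pvParent_right]
      have hr : pvHeapify l n i = pvHeapify (pvSwap l i lg) n lg := by
        rw [pvHeapify, dif_pos (by simpa using hlg)]
      -- values in the swapped list
      have hgi : pvGetI (pvSwap l i lg) i = pvGetI l lg := pvGetI_swap_i hil (by omega)
      have hglg : pvGetI (pvSwap l i lg) lg = pvGetI l i := pvGetI_swap_j hlgl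
      have hgo : ∀ k, k ≠ i → k ≠ lg → pvGetI (pvSwap l i lg) k = pvGetI l k :=
        fun k h1 h2 => pvGetI_swap_other h1 h2
      -- precondition for the recursive call
      have hpre' : ∀ j, pvDesc lg j → j ≠ lg → j < n → pvHeapOK (pvSwap l i lg) n j := by
        intro j hdj hne hjn
        have hlgj : lg < j := lt_of_le_of_ne (pvDesc_le hdj) (Ne.symm hne)
        have hOK := hpre j (pvDesc_trans hdilg hdj) (by omega) hjn
        unfold pvHeapOK at hOK ⊢
        rw [hgo j (by omega) (by omega), hgo (2*j+1) (by omega) (by omega),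
            hgo (2*j+2) (by omega) (by omega)]
        exact hOK
      have hih := ih lg (pvSwap l i lg) (by omega) (by rw [pvSwap_length]; exact hlen) hpre'
      rw [hr]
      obtain ⟨ih1, ih2, ih3, ih4, ih5, ih6⟩ := hih
      have hndi : ¬ pvDesc lg i := fun h => absurd (pvDesc_le h) (by omega)
      -- the root of the processed subtree keeps the largest value
      have hgri : pvGetI (pvHeapify (pvSwap l i lg) n lg) i = pvGetI l lg := by
        rw [ih3 i hndi, hgi]
      -- subtree of lg in l is bounded by pvGetI l lg
      have hroot : ∀ k, pvDesc lg k → k < n → pvGetI l k ≤ pvGetI l lg := by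
        apply pvRootDom
        intro j hdj hjn
        exact hpre j (pvDesc_trans hdilg hdj) (by have := pvDesc_le hdj; omega) hjn
      refine ⟨by rw [ih1, pvSwap_length], ih2.trans (pvSwap_perm l i lg hil hlgl), ?_, ?_, ?_, ?_⟩
      · -- untouched outside the subtree of i
        intro k hk
        have hnd : ¬ pvDesc lg k := fun h => hk (pvDesc_trans hdilg h)
        rw [ih3 k hnd, hgo k (fun h => hk (h ▸ pvDesc_refl i)) (fun h => hk (h ▸ hdilg))]
      · -- untouched at or beyond n
        intro k hk
        rw [ih4 k hk, hgo k (by omega) (by omega)]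
      · -- values of the subtree come from the subtree
        intro k hk hkn
        by_cases hdk : pvDesc lg k
        · obtain ⟨k'', hd'', hn'', he⟩ := ih5 k hdk hkn
          by_cases h2 : k'' = lg
          · subst h2
            exact ⟨i, pvDesc_refl i, by omega, by rw [he, hglg]⟩
          · have hlgk : lg < k'' := lt_of_le_of_ne (pvDesc_le hd'') (Ne.symm h2)
            exact ⟨k'', pvDesc_trans hdilg hd'', hn'',
              by rw [he, hgo k'' (by omega) (by omega)]⟩
        · have he : pvGetI (pvHeapify (pvSwap l i lg) n lg) k = pvGetI (pvSwap l i lg) k :=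
            ih3 k hdk
          by_cases h2 : k = i
          · subst h2
            exact ⟨lg, hdilg, hltn, by rw [he, hgi]⟩
          · have h3 : k ≠ lg := fun h => hdk (h ▸ pvDesc_refl lg)
            exact ⟨k, hk, hkn, by rw [he, hgo k h2 h3]⟩
      · -- heap property on the whole subtree of i
        intro j hdj hjn
        by_cases hdlgj : pvDesc lg j
        · exact ih6 j hdlgj hjn
        · by_cases hji : j = i
          · subst hji
            -- bound both children of the root by pvGetI l lg
            have hcb : ∀ c, (c = 2*j+1 ∨ c = 2*j+2) → c < n →
                pvGetI (pvHeapify (pvSwap l j lg) n lg) c ≤ pvGetI l lg := by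
              intro c hc hcn
              by_cases hclg : c = lg
              · subst hclg
                obtain ⟨k'', hd'', hn'', he⟩ := ih5 lg (pvDesc_refl lg) hcn
                by_cases h2 : k'' = lg
                · subst h2
                  rw [he, hglg]
                  exact hsp.2.1
                · have hlgk : lg < k'' := lt_of_le_of_ne (pvDesc_le hd'') (Ne.symm h2)
                  rw [he, hgo k'' (by omega) (by omega)]
                  exact hroot k'' hd'' hn''
              · have hcd : ¬ pvDesc lg c := by
                  intro h
                  have h9 := pvDesc_parent h hclg
                  have hpc : pvParent c = j := by
                    rcases hc with h | h
                    · rw [h, pvParent_left]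
                    · rw [h, pvParent_right]
                  rw [hpc] at h9
                  exact absurd (pvDesc_le h9) (by omega)
                rw [ih3 c hcd, hgo c (by omega) hclg]
                rcases hc with h | h
                · rw [h]; exact hsp.2.2.1 (h ▸ hcn)
                · rw [h]; exact hsp.2.2.2 (h ▸ hcn)
            constructor
            · intro h
              rw [hgri]
              exact hcb (2*j+1) (Or.inl rfl) h
            · intro h
              rw [hgri]
              exact hcb (2*j+2) (Or.inr rfl) h
          · -- a node between i and the subtree of lg: untouched, as are its children
            have hij : i < j := lt_of_le_of_ne (pvDesc_le hdj) (Ne.symm hji)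
            have hjlg : j ≠ lg := fun h => hdlgj (h ▸ pvDesc_refl lg)
            have hcnd : ∀ c, (c = 2*j+1 ∨ c = 2*j+2) → ¬ pvDesc lg c := by
              intro c hc h
              have hpc : pvParent c = j := by
                rcases hc with h' | h'
                · rw [h', pvParent_left]
                · rw [h', pvParent_right]
              by_cases hclg : c = lg
              · rw [hclg, hplg] at hpc; omega
              · have h9 := pvDesc_parent h hclg
                rw [hpc] at h9
                exact hdlgj h9
            have hOK := hpre j hdj hji hjn
            unfold pvHeapOK at hOK ⊢
            have hc1 := hcnd (2*j+1) (Or.inl rfl)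
            have hc2 := hcnd (2*j+2) (Or.inr rfl)
            rw [ih3 j hdlgj, ih3 (2*j+1) hc1, ih3 (2*j+2) hc2,
                hgo j hji hjlg,
                hgo (2*j+1) (by omega) (fun h => hc1 (h ▸ pvDesc_refl lg)),
                hgo (2*j+2) (by omega) (fun h => hc2 (h ▸ pvDesc_refl lg))]
            exact hOK

theorem pvHeapify_spec (n : Nat) : ∀ (i : Nat) (l : List Int), n ≤ l.length →
    (∀ j, pvDesc i j → j ≠ i → j < n → pvHeapOK l n j) →
    ((pvHeapify l n i).length = l.length ∧
     (pvHeapify l n i).Perm l ∧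
     (∀ k, ¬ pvDesc i k → pvGetI (pvHeapify l n i) k = pvGetI l k) ∧
     (∀ k, n ≤ k → pvGetI (pvHeapify l n i) k = pvGetI l k) ∧
     (∀ k, pvDesc i k → k < n → ∃ k', pvDesc i k' ∧ k' < n ∧ pvGetI (pvHeapify l n i) k = pvGetI l k') ∧
     (∀ j, pvDesc i j → j < n → pvHeapOK (pvHeapify l n i) n j)) :=
  fun i l hlen hpre => pvHeapify_spec_aux n (n - i) i l (le_refl _) hlen hpre

theorem pvBuild_spec (n : Nat) : ∀ (i : Nat) (l : List Int), n ≤ l.length →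
    (∀ j, i < j → j < n → pvHeapOK l n j) →
    ((pvBuild l n i).length = l.length ∧ (pvBuild l n i).Perm l ∧
     (∀ j, j < n → pvHeapOK (pvBuild l n i) n j)) := by
  intro i
  induction i with
  | zero =>
    intro l hlen hinv
    have hs := pvHeapify_spec n 0 l hlen (fun j _ hne hj => hinv j (by omega) hj)
    exact ⟨hs.1, hs.2.1, fun j hj => hs.2.2.2.2.2 j (pvDesc_zero j) hj⟩
  | succ i ih =>
    intro l hlen hinv
    have hs := pvHeapify_spec n (i+1) l hlen
      (fun j hd hne hj => hinv j (by have := pvDesc_le hd; omega) hj)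
    have hnew : ∀ j, i < j → j < n → pvHeapOK (pvHeapify l n (i+1)) n j := by
      intro j hij hj
      by_cases hd : pvDesc (i+1) j
      · exact hs.2.2.2.2.2 j hd hj
      · have hj1 : j ≠ i + 1 := fun h => hd (h ▸ pvDesc_refl (i+1))
        have hcl : ¬ pvDesc (i+1) (2*j+1) := by
          intro hdc
          have h9 := pvDesc_parent hdc (by omega)
          rw [pvParent_left] at h9
          exact hd h9
        have hcr : ¬ pvDesc (i+1) (2*j+2) := by
          intro hdc
          have h9 := pvDesc_parent hdc (by omega)
          rw [pvParent_right] at h9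
          exact hd h9
        have hOK := hinv j (by omega) hj
        unfold pvHeapOK at hOK ⊢
        rw [hs.2.2.1 j hd, hs.2.2.1 _ hcl, hs.2.2.1 _ hcr]
        exact hOK
    have hb := ih (pvHeapify l n (i+1)) (by rw [hs.1]; exact hlen) hnew
    refine ⟨by rw [pvBuild, hb.1, hs.1], ?_, ?_⟩
    · rw [pvBuild]
      exact (hb.2.1).trans hs.2.1
    · intro j hj
      rw [pvBuild]
      exact hb.2.2 j hj

theorem pvTake_perm {r l : List Int} (n : Nat) (hp : r.Perm l) (hlen : r.length = l.length)
    (hsuf : ∀ k, n ≤ k → pvGetI r k = pvGetI l k) : (r.take n).Perm (l.take n) := by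
  have hd : r.drop n = l.drop n := by
    apply List.ext_getElem (by simp [hlen])
    intro k h1 h2
    have h3 : n + k < r.length := by simp at h1; omega
    have h4 : n + k < l.length := by omega
    have h5 := hsuf (n + k) (by omega)
    rw [pvGetI, pvGetI, List.getD_eq_getElem r 0 h3, List.getD_eq_getElem l 0 h4] at h5
    simpa [List.getElem_drop] using h5
  have h6 := hp
  rw [← List.take_append_drop n r, ← List.take_append_drop n l, hd] at h6
  exact (List.perm_append_right_iff _).mp h6

theorem pvSwapTake_perm (l : List Int) (f : Nat) (h : f + 1 < l.length) :
    ((pvSwap l (f+1) 0).take (f+1) ++ [pvGetI l 0]).Perm (l.take (f+2)) := by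
  cases l with
  | nil => simp at h
  | cons a t =>
    have hf : f < t.length := by simp at h; omega
    have h1 : pvSwap (a::t) (f+1) 0 = t.getD f 0 :: t.set f a := by
      simp [pvSwap, pvGetI, List.getD]
    have h2 : pvGetI (a::t) 0 = a := by simp [pvGetI, List.getD]
    rw [h1, h2, List.take_succ_cons, List.take_set_of_le (le_refl f),
        show f + 2 = (f+1) + 1 from rfl, List.take_succ_cons,
        List.take_succ_eq_append_getElem hf,
        List.getD_eq_getElem t 0 hf]
    exact ((List.perm_append_singleton a (t.take f)).cons t[f]).trans
      (((List.Perm.swap a t[f] (t.take f)).trans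
        ((List.perm_append_singleton t[f] (t.take f)).symm.cons a)).symm).symm

theorem pvEmit_sorted : ∀ (f : Nat) (l : List Int), f + 1 ≤ l.length →
    (∀ j, j < f + 1 → pvHeapOK l (f+1) j) →
    pvGetI l 0 :: pvEmit l f = (PySem.List.sorted (l.take (f+1)) (fun x => x) false).reverse := by
  intro f
  induction f with
  | zero =>
    intro l hlen _
    cases l with
    | nil => simp at hlen
    | cons a t =>
      have h1 : PySem.List.sorted ([a] : List Int) (fun x => x) false = [a] :=
        PySem.List.sorted_id_eq_of_perm_of_pairwise _ _ (List.Perm.refl _) (by simp)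
      simp [pvEmit, pvGetI, List.getD, h1]
  | succ f ih =>
    intro l hlen hheap
    have hl1 : f + 1 < l.length := by omega
    -- the heap's root bounds every entry of the first f+2 positions
    have hroot : ∀ m, m < f + 2 → pvGetI l m ≤ pvGetI l 0 :=
      fun m hm => pvRootDom (fun j _ hj => hheap j hj) m (pvDesc_zero m) hm
    -- the swap keeps positions 1..f intact, so the heap property below the root survives
    have hpre : ∀ j, pvDesc 0 j → j ≠ 0 → j < f+1 → pvHeapOK (pvSwap l (f+1) 0) (f+1) j := by
      intro j _ hne hj
      have h2 := hheap j (by omega)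
      constructor
      · intro h
        rw [pvGetI_swap_other (by omega) (by omega), pvGetI_swap_other (by omega) (by omega)]
        exact h2.1 (by omega)
      · intro h
        rw [pvGetI_swap_other (by omega) (by omega), pvGetI_swap_other (by omega) (by omega)]
        exact h2.2 (by omega)
    have hsp := pvHeapify_spec (f+1) 0 (pvSwap l (f+1) 0)
      (by rw [pvSwap_length]; omega) hpre
    have hlen' : (pvHeapify (pvSwap l (f+1) 0) (f+1) 0).length = l.length := by
      rw [hsp.1, pvSwap_length]
    have hheap' : ∀ j, j < f+1 → pvHeapOK (pvHeapify (pvSwap l (f+1) 0) (f+1) 0) (f+1) j :=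
      fun j hj => hsp.2.2.2.2.2 j (pvDesc_zero j) hj
    have hIH := ih (pvHeapify (pvSwap l (f+1) 0) (f+1) 0) (by omega) hheap'
    have hEm : pvEmit l (f+1)
        = pvGetI (pvHeapify (pvSwap l (f+1) 0) (f+1) 0) 0
          :: pvEmit (pvHeapify (pvSwap l (f+1) 0) (f+1) 0) f := by
      rw [pvEmit]
    -- the prefix of length f+1 after heapify is a rearrangement of the swapped prefix
    have hpref : ((pvHeapify (pvSwap l (f+1) 0) (f+1) 0).take (f+1)).Perm
        ((pvSwap l (f+1) 0).take (f+1)) :=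
      pvTake_perm (f+1) hsp.2.1 hsp.1 hsp.2.2.2.1
    -- every entry of the swapped prefix is at most the extracted root
    have hbound : ∀ x, x ∈ (pvSwap l (f+1) 0).take (f+1) → x ≤ pvGetI l 0 := by
      intro x hx
      rw [List.mem_take_iff_getElem] at hx
      obtain ⟨k, hk, he⟩ := hx
      have hkf : k < f + 1 := by omega
      have hkl : k < (pvSwap l (f+1) 0).length := by rw [pvSwap_length]; omega
      have he2 : pvGetI (pvSwap l (f+1) 0) k = x := by
        rw [pvGetI, List.getD_eq_getElem _ 0 hkl]; exact he
      rcases Nat.eq_zero_or_pos k with hk0 | hk0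
      · subst hk0
        rw [pvGetI_swap_j (by omega)] at he2
        rw [← he2]
        exact hroot (f+1) (by omega)
      · rw [pvGetI_swap_other (by omega) (by omega)] at he2
        rw [← he2]
        exact hroot k (by omega)
    -- name the sorted order of the longer prefix
    have hkey : PySem.List.sorted (l.take (f+2)) (fun x => x) false
        = PySem.List.sorted ((pvHeapify (pvSwap l (f+1) 0) (f+1) 0).take (f+1)) (fun x => x) false
          ++ [pvGetI l 0] := by
      apply PySem.List.sorted_id_eq_of_perm_of_pairwise
      · refine ((PySem.List.sorted_perm _ _ _).append_right _).trans ?_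
        exact (hpref.append_right _).trans (pvSwapTake_perm l f hl1)
      · rw [List.pairwise_append]
        refine ⟨?_, by simp, ?_⟩
        · simpa using PySem.List.sorted_pairwise ((pvHeapify (pvSwap l (f+1) 0) (f+1) 0).take (f+1)) (fun x => x)
        intro x hx y hy
        rw [List.mem_singleton] at hy
        subst hy
        rw [PySem.List.mem_sorted] at hx
        exact hbound x (hpref.mem_iff.mp hx)
    rw [hEm, hIH, hkey]
    simp

theorem pvStepTwo_cons (x : Int) (xs : List Int) :
    pvStepTwo (x :: xs) = x :: pvStepTwo (xs.drop 1) := by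
  cases xs <;> simp [pvStepTwo]

theorem pvExtract_eq : ∀ (f : Nat) (l : List Int) (n1 n2 : List Int),
    pvExtract l n1 n2 2 f = (n1 ++ pvStepTwo ((pvEmit l f).drop 1), n2 ++ pvStepTwo (pvEmit l f)) ∧
    pvExtract l n1 n2 1 f = (n1 ++ pvStepTwo (pvEmit l f), n2 ++ pvStepTwo ((pvEmit l f).drop 1)) := by
  intro f
  induction f with
  | zero => intro l n1 n2; simp [pvExtract, pvEmit, pvStepTwo]
  | succ f ih =>
    intro l n1 n2
    have hE : pvEmit l (f+1)
        = pvGetI (pvHeapify (pvSwap l (f+1) 0) (f+1) 0) 0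
          :: pvEmit (pvHeapify (pvSwap l (f+1) 0) (f+1) 0) f := by
      rw [pvEmit]
    constructor
    · rw [pvExtract, if_neg (by norm_num), (ih _ n1 _).2, hE, pvStepTwo_cons]
      simp
    · rw [pvExtract, if_pos rfl, (ih _ _ n2).1, hE, pvStepTwo_cons]
      simp

theorem pvConvertLoop_eq (xs : List Int) : ∀ (i : Nat), i ≤ xs.length → ∀ (p : Nat) (acc : Int),
    pvConvertLoop xs p acc i = acc + 10 ^ p * pvValue (xs.take i) := by
  intro i
  induction i with
  | zero => intro _ p acc; simp [pvConvertLoop, pvValue]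
  | succ i ih =>
    intro hi p acc
    have hlt : i < xs.length := by omega
    rw [pvConvertLoop, ih (by omega)]
    rw [List.take_succ_eq_append_getElem hlt]
    have h1 : pvValue (xs.take i ++ [xs[i]]) = pvValue (xs.take i) * 10 + xs[i] := by
      unfold pvValue
      rw [List.foldl_append, List.foldl_cons, List.foldl_nil]
    have h2 : pvGetI xs i = xs[i] := List.getD_eq_getElem xs 0 hlt
    rw [h1, h2, pow_succ]
    ring

theorem pvConvert_eq (xs : List Int) : pvConvert xs = pvValue xs := by
  rw [pvConvert, pvConvertLoop_eq xs xs.length (le_refl _) 0 0]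
  simp

-- ===== VERDICT (by name: the statement is the Claim_ definition above) =====
theorem rearrange_array_elements_spec : Claim_equal_rearrange_array_elements := by
  intro arr _hdom hpre
  unfold Pre_rearrange_array_elements at hpre
  unfold Spec_rearrange_array_elements
  have hn : 0 < arr.length := List.length_pos_iff.mpr hpre
  have hb := pvBuild_spec arr.length arr.length arr (le_refl _) (fun j h1 h2 => absurd h1 (by omega))
  have hlen : (pvBuild arr arr.length arr.length).length = arr.length := hb.1
  have hn1 : arr.length - 1 + 1 = arr.length := by omega
  have hheap : ∀ j, j < arr.length - 1 + 1 →
      pvHeapOK (pvBuild arr arr.length arr.length) (arr.length - 1 + 1) j := by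
    intro j hj
    rw [hn1]
    exact hb.2.2 j (by omega)
  have hE := pvEmit_sorted (arr.length - 1) (pvBuild arr arr.length arr.length) (by omega) hheap
  rw [hn1] at hE
  rw [show (pvBuild arr arr.length arr.length).take arr.length = pvBuild arr arr.length arr.length
      from List.take_of_length_le (by omega)] at hE
  have hsort : PySem.List.sorted (pvBuild arr arr.length arr.length) (fun x => x) false
      = PySem.List.sorted arr (fun x => x) false :=
    PySem.List.sorted_eq_sorted_of_perm _ _ _ (fun a b h => h) hb.2.1
  rw [hsort] at hE
  have hex := pvExtract_eq (arr.length - 1) (pvBuild arr arr.length arr.length)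
    [pvGetI (pvBuild arr arr.length arr.length) 0] []
  have h1 : [pvGetI (pvBuild arr arr.length arr.length) 0]
      ++ pvStepTwo ((pvEmit (pvBuild arr arr.length arr.length) (arr.length - 1)).drop 1)
      = pvStepTwo ((PySem.List.sorted arr (fun x => x) false).reverse) := by
    rw [← hE, pvStepTwo_cons]
    simp
  have h2 : ([] : List Int)
      ++ pvStepTwo (pvEmit (pvBuild arr arr.length arr.length) (arr.length - 1))
      = pvStepTwo (((PySem.List.sorted arr (fun x => x) false).reverse).drop 1) := by
    rw [← hE]
    simp
  simp only [rearrange_array_elements, rearrange_array_elements_alt]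
  rw [hex.1, pvConvert_eq, pvConvert_eq, h1, h2]
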